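-- pv_equiv track=rewrite | github.com/hao-ai-lab/research-agent | server/wild_loop_v2.py | get_system_health_from_runs
-- ===== SOURCE A (Python) =====
-- def get_system_health_from_runs(runs_dict: dict) -> dict:
--     """Compute system utilization stats from a runs dict.
--
--     Called from the server endpoint handler (/wild/v2/system-health),
--     not from the engine itself.  The agent discovers health by curling
--     the endpoint.
--     """
--     health = {
--         "running": 0, "queued": 0, "completed": 0,
--         "failed": 0, "total": 0, "max_concurrent": 5,
--     }
--     for r in runs_dict.values():
--         status = r.get("status", "")
--         health["total"] += 1
--         if status == "running":
--             health["running"] += 1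
--         elif status in ("queued", "ready"):
--             health["queued"] += 1
--         elif status == "finished":
--             health["completed"] += 1
--         elif status == "failed":
--             health["failed"] += 1
--     return health
-- ===== SOURCE B (Python) =====
-- def get_system_health_from_runs(runs_dict: dict) -> dict:
--     """Tabulate statuses in one sweep, then assemble the health dict from counts."""
--     statuses = [r.get("status", "") for r in runs_dict.values()]
--     return {
--         "running": statuses.count("running"),
--         "queued": statuses.count("queued") + statuses.count("ready"),
--         "completed": statuses.count("finished"),
--         "failed": statuses.count("failed"),
--         "total": len(statuses),
--         "max_concurrent": 5,
--     }
-- ===== Notes on version B (the rewrite author's own statement) =====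
-- stated objective: simpler
-- what changed: Replaces A's branch-while-scanning loop that mutates a counters dict with a tabulate-then-assemble shape: extract the status list once, then build the result dict purely from list.count lookups and len; no per-element branch cascade or mutable accumulator remains.
import Mathlib
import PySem

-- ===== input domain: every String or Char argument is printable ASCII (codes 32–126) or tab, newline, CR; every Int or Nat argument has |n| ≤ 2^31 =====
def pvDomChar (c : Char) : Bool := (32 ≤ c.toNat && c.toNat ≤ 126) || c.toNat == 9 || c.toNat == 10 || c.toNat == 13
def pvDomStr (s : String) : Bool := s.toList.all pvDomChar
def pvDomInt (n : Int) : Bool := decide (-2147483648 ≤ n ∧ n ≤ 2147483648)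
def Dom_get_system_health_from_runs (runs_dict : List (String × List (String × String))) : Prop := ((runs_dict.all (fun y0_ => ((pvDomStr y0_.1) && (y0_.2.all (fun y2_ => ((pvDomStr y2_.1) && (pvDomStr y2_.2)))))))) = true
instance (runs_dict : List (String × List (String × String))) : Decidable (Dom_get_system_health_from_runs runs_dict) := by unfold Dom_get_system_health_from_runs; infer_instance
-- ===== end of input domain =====

-- B replaces A's branch-while-scanning counter loop by extracting the status list once and
-- assembling the dict from list.count lookups (objective: simpler).

-- ===== PORT A =====
-- r.get("status", "") of the run dict r
def pvStatusOf (r : String × List (String × String)) : String :=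
  (PySem.Dict.mk r.2).getD "status" ""

-- the body of A's for-loop: unconditional total bump, then the status branch cascade
def pvStepA (health : PySem.Dict String Int) (r : String × List (String × String)) :
    PySem.Dict String Int :=
  let status := pvStatusOf r
  let health := health.modify "total" 0 (· + 1)
  if status == "running" then health.modify "running" 0 (· + 1)
  else if status == "queued" || status == "ready" then health.modify "queued" 0 (· + 1)
  else if status == "finished" then health.modify "completed" 0 (· + 1)
  else if status == "failed" then health.modify "failed" 0 (· + 1)
  else health

def get_system_health_from_runs (runs_dict : List (String × List (String × String))) :
    List (String × Int) :=
  let health : PySem.Dict String Int :=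
    PySem.Dict.mk [("running", 0), ("queued", 0), ("completed", 0),
                   ("failed", 0), ("total", 0), ("max_concurrent", 5)]
  (runs_dict.foldl pvStepA health).items

-- ===== PORT B =====
def get_system_health_from_runs_alt (runs_dict : List (String × List (String × String))) :
    List (String × Int) :=
  let statuses := runs_dict.map pvStatusOf
  [("running", (statuses.count "running" : Int)),
   ("queued", (statuses.count "queued" : Int) + (statuses.count "ready" : Int)),
   ("completed", (statuses.count "finished" : Int)),
   ("failed", (statuses.count "failed" : Int)),
   ("total", (statuses.length : Int)),
   ("max_concurrent", 5)]

-- ===== PRECONDITION & SPEC =====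
def Spec_get_system_health_from_runs (runs_dict : List (String × List (String × String))) (out : List (String × Int)) : Prop := out = get_system_health_from_runs_alt runs_dict
instance (runs_dict : List (String × List (String × String))) (out : List (String × Int)) : Decidable (Spec_get_system_health_from_runs runs_dict out) := by unfold Spec_get_system_health_from_runs; infer_instance

-- ===== CLAIM (what is proved, stated in full; the proofs are below) =====
def Claim_equal_get_system_health_from_runs : Prop := ∀ (runs_dict : List (String × List (String × String))), Dom_get_system_health_from_runs runs_dict → Spec_get_system_health_from_runs runs_dict (get_system_health_from_runs runs_dict)

-- ===== LEMMAS AND PROOFS =====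

-- A's loop body in terms of the extracted status only
def pvStepS (health : PySem.Dict String Int) (status : String) : PySem.Dict String Int :=
  let health := health.modify "total" 0 (· + 1)
  if status == "running" then health.modify "running" 0 (· + 1)
  else if status == "queued" || status == "ready" then health.modify "queued" 0 (· + 1)
  else if status == "finished" then health.modify "completed" 0 (· + 1)
  else if status == "failed" then health.modify "failed" 0 (· + 1)
  else health

lemma pvFold_invariant (l : List String) (a b c d e : Int) :
    l.foldl pvStepS
      (PySem.Dict.mk [("running", a), ("queued", b), ("completed", c),
                      ("failed", d), ("total", e), ("max_concurrent", 5)]) =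
    PySem.Dict.mk [("running", a + (l.count "running" : Int)),
                   ("queued", b + (l.count "queued" : Int) + (l.count "ready" : Int)),
                   ("completed", c + (l.count "finished" : Int)),
                   ("failed", d + (l.count "failed" : Int)),
                   ("total", e + (l.length : Int)),
                   ("max_concurrent", 5)] := by
  induction l generalizing a b c d e with
  | nil => simp
  | cons s t ih =>
    simp only [List.foldl_cons]
    have hstep : ∀ (a b c d e : Int),
        pvStepS (PySem.Dict.mk [("running", a), ("queued", b), ("completed", c),
                                ("failed", d), ("total", e), ("max_concurrent", 5)]) s =
        if s = "running" then
          PySem.Dict.mk [("running", a + 1), ("queued", b), ("completed", c),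
                         ("failed", d), ("total", e + 1), ("max_concurrent", 5)]
        else if s = "queued" ∨ s = "ready" then
          PySem.Dict.mk [("running", a), ("queued", b + 1), ("completed", c),
                         ("failed", d), ("total", e + 1), ("max_concurrent", 5)]
        else if s = "finished" then
          PySem.Dict.mk [("running", a), ("queued", b), ("completed", c + 1),
                         ("failed", d), ("total", e + 1), ("max_concurrent", 5)]
        else if s = "failed" then
          PySem.Dict.mk [("running", a), ("queued", b), ("completed", c),
                         ("failed", d + 1), ("total", e + 1), ("max_concurrent", 5)]
        else
          PySem.Dict.mk [("running", a), ("queued", b), ("completed", c),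
                         ("failed", d), ("total", e + 1), ("max_concurrent", 5)] := by
      intro a b c d e
      simp [pvStepS, PySem.Dict.modify, PySem.Dict.insert, PySem.Dict.getD,
            PySem.Dict.get?, PySem.Dict.contains]
    rw [hstep]
    split_ifs with h1 h2 h3 h4 <;>
      · rw [ih]
        try rcases h2 with h2 | h2
        all_goals simp_all [List.count_cons]
        all_goals try and_intros
        all_goals push_cast
        all_goals omega

theorem pv_main (runs_dict : List (String × List (String × String))) :
    get_system_health_from_runs runs_dict = get_system_health_from_runs_alt runs_dict := by
  unfold get_system_health_from_runs get_system_health_from_runs_alt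
  have hmap : runs_dict.foldl pvStepA
      (PySem.Dict.mk [("running", 0), ("queued", 0), ("completed", 0),
                      ("failed", 0), ("total", 0), ("max_concurrent", 5)]) =
      (runs_dict.map pvStatusOf).foldl pvStepS
      (PySem.Dict.mk [("running", 0), ("queued", 0), ("completed", 0),
                      ("failed", 0), ("total", 0), ("max_concurrent", 5)]) := by
    rw [List.foldl_map]; rfl
  simp only [hmap, pvFold_invariant]
  simp

-- ===== VERDICT (by name: the statement is the Claim_ definition above) =====
theorem get_system_health_from_runs_spec : Claim_equal_get_system_health_from_runs := by
  intro runs_dict _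
  exact pv_main runs_dict
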